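-- pv_equiv track=rewrite | github.com/PyNoe/Python_TD | TP Prépa/Entrainement/Fraction Egyptienne/fraction_egyptienne.py | estegyptienne
-- ===== SOURCE A (Python) =====
-- def estegyptienne(lst):
--     for i in range(0, len(lst)):
--         ref = lst[i]
--         if ref < 2:
--             return False
--
--         j = i
--         while j > 0:
--             if lst[i] < lst[j]:
--                 return False
--             j += -1
--
--     return True
-- ===== SOURCE B (Python) =====
-- def estegyptienne(lst):
--     return all(x >= 2 for x in lst) and all(a <= b for a, b in zip(lst, lst[1:]))
-- ===== Notes on version B (the rewrite author's own statement) =====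
-- stated objective: idiomatic
-- what changed: Replaced the nested index scan with early returns by two linear all(...) passes: an element-wise >=2 check plus an adjacent-pair non-decreasing check over zip(lst, lst[1:]).
-- intended difference: On lists whose elements are all >=2 and whose tail (all but the first element) is non-decreasing but whose first element exceeds the second, A returns True because its inner while stops at j=1 and never compares against the first element, while B returns False, which is intended since such a list is not non-decreasing. — e.g. on estegyptienne([5, 3]): A returns true, B returns false
import Mathlib
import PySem

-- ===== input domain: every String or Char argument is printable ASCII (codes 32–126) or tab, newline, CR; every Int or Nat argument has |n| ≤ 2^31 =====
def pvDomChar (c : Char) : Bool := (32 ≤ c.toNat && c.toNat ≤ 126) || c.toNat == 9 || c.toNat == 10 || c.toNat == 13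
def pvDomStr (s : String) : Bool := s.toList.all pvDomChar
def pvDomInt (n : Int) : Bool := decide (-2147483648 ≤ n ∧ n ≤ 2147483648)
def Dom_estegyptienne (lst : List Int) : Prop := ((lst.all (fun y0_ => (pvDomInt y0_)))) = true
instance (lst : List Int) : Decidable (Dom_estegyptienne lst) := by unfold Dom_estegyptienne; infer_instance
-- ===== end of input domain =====

-- B replaces A's nested index scan by two adjacent-pair all(...) passes; A's
-- inner while never compares against the first element (it stops at j = 1), so on lists
-- that are non-decreasing from index 1 on but whose first element exceeds the second A
-- wrongly returns True; B
-- returns the intended False there (stated in D_ below).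

-- ===== PORT A =====
-- inner while loop of A: j counts i, i-1, …, 1; 'if lst[i] < lst[j]: return False'
def egyInner (lst : List Int) (xi : Int) : Nat → Bool
  | 0 => true
  | j + 1 => if xi < lst.getD (j + 1) 0 then false else egyInner lst xi j

-- outer for loop of A over the indices range(0, len(lst)); lst.getD i 0 is exact here
-- since every index produced by List.range lst.length is in range (no IndexError).
def egyLoop (lst : List Int) : List Nat → Bool
  | [] => true
  | i :: rest =>
    let ref := lst.getD i 0
    if ref < 2 then false
    else if egyInner lst ref i = false then false
    else egyLoop lst rest

def estegyptienne (lst : List Int) : Bool :=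
  egyLoop lst (List.range lst.length)

-- ===== PORT B =====
-- all(x >= 2 for x in lst) and all(a <= b for a, b in zip(lst, lst[1:]))
-- (the slice lst[1:] is exactly lst.drop 1)
def estegyptienne_alt (lst : List Int) : Bool :=
  (lst.all (fun x => 2 ≤ x)) && ((lst.zip (lst.drop 1)).all (fun p => p.1 ≤ p.2))

-- ===== PRECONDITION & SPEC =====
-- On lists whose elements are all ≥ 2 and whose tail is non-decreasing but whose first
-- element exceeds the second, A returns True (its inner while never compares against the
-- first element) while B returns False, which is intended: such a list is not non-decreasing.
def D_estegyptienne (lst : List Int) : Prop :=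
  2 ≤ lst.length ∧ lst.getD 1 0 < lst.getD 0 0 ∧ (∀ x ∈ lst, 2 ≤ x) ∧
    (((lst.drop 1).zip (lst.drop 2)).all (fun p => p.1 ≤ p.2)) = true
instance (lst : List Int) : Decidable (D_estegyptienne lst) := by unfold D_estegyptienne; infer_instance

def Spec_estegyptienne (lst : List Int) (out : Bool) : Prop := ¬ D_estegyptienne lst → out = estegyptienne_alt lst
instance (lst : List Int) (out : Bool) : Decidable (Spec_estegyptienne lst out) := by unfold Spec_estegyptienne; infer_instance

def pvDiffWitness_estegyptienne : List Int := [5, 3]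
def pvDiffWitnessOut_estegyptienne : Bool × Bool := (true, false)

-- ===== CLAIM (what is proved, stated in full; the proofs are below) =====
def Claim_unchanged_estegyptienne : Prop := ∀ (lst : List Int), Dom_estegyptienne lst → Spec_estegyptienne lst (estegyptienne lst)
def Claim_changed_estegyptienne : Prop := Dom_estegyptienne (pvDiffWitness_estegyptienne) ∧ D_estegyptienne (pvDiffWitness_estegyptienne) ∧ estegyptienne (pvDiffWitness_estegyptienne) = pvDiffWitnessOut_estegyptienne.1 ∧ estegyptienne_alt (pvDiffWitness_estegyptienne) = pvDiffWitnessOut_estegyptienne.2 ∧ pvDiffWitnessOut_estegyptienne.1 ≠ pvDiffWitnessOut_estegyptienne.2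
def Claim_exact_estegyptienne : Prop := ∀ (lst : List Int), Dom_estegyptienne lst → D_estegyptienne lst → estegyptienne lst ≠ estegyptienne_alt lst

-- ===== LEMMAS AND PROOFS =====

theorem getD_drop' (lst : List Int) (k i : Nat) :
    (lst.drop k).getD i 0 = lst.getD (k + i) 0 := by
  simp [List.getD, List.getElem?_drop]

-- the inner while succeeds iff lst[j] ≤ x for every j with 1 ≤ j ≤ k
theorem egyInner_iff (lst : List Int) (x : Int) (k : Nat) :
    egyInner lst x k = true ↔ ∀ j : Nat, 1 ≤ j → j ≤ k → lst.getD j 0 ≤ x := by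
  induction k with
  | zero => simp [egyInner]; omega
  | succ k ih =>
    simp only [egyInner]
    by_cases h : x < lst.getD (k + 1) 0
    · simp only [if_pos h]
      constructor
      · intro hf; cases hf
      · intro hall; exact absurd (hall (k+1) (by omega) (by omega)) (by omega)
    · simp only [if_neg h, ih]
      constructor
      · intro hall j h1 h2
        rcases Nat.lt_or_ge j (k+1) with hj | hj
        · exact hall j h1 (by omega)
        · have : j = k + 1 := by omega
          subst this; omega
      · intro hall j h1 h2; exact hall j h1 (by omega)

-- the outer for loop succeeds iff every visited index passes its ref check and inner loop
theorem egyLoop_iff (lst : List Int) (l : List Nat) :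
    egyLoop lst l = true ↔ ∀ i ∈ l, 2 ≤ lst.getD i 0 ∧ egyInner lst (lst.getD i 0) i = true := by
  induction l with
  | nil => simp [egyLoop]
  | cons i rest ih =>
    simp only [egyLoop, List.mem_cons]
    by_cases h1 : lst.getD i 0 < 2
    · simp only [if_pos h1]
      constructor
      · intro hf; cases hf
      · intro hall; exact absurd (hall i (Or.inl rfl)).1 (by omega)
    · simp only [if_neg h1]
      by_cases h2 : egyInner lst (lst.getD i 0) i = false
      · simp only [if_pos h2]
        constructor
        · intro hf; cases hf
        · intro hall
          have := (hall i (Or.inl rfl)).2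
          rw [this] at h2; cases h2
      · simp only [if_neg h2, ih]
        have h2' : egyInner lst (lst.getD i 0) i = true := by
          cases hb : egyInner lst (lst.getD i 0) i
          · exact absurd hb h2
          · rfl
        constructor
        · rintro hall j (rfl | hj)
          · exact ⟨by omega, h2'⟩
          · exact hall j hj
        · rintro hall j hj; exact hall j (Or.inr hj)

-- characterisation of A: all elements ≥ 2 and lst[j] ≤ lst[i] for all 1 ≤ j ≤ i < n
theorem estA_iff (lst : List Int) :
    estegyptienne lst = true ↔
      (∀ i : Nat, i < lst.length → 2 ≤ lst.getD i 0) ∧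
      (∀ j i : Nat, 1 ≤ j → j ≤ i → i < lst.length → lst.getD j 0 ≤ lst.getD i 0) := by
  unfold estegyptienne
  rw [egyLoop_iff]
  constructor
  · intro h
    refine ⟨fun i hi => (h i (List.mem_range.mpr hi)).1, fun j i h1 h2 h3 => ?_⟩
    have := (h i (List.mem_range.mpr h3)).2
    exact (egyInner_iff lst _ i).mp this j h1 h2
  · rintro ⟨ha, hb⟩ i hi
    have hi' := List.mem_range.mp hi
    exact ⟨ha i hi', (egyInner_iff lst _ i).mpr (fun j h1 h2 => hb j i h1 h2 hi')⟩

-- an adjacent-pair zip check succeeds iff lst[i] ≤ lst[i+1] for every i with i+1 < n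
theorem zipAdj_iff (lst : List Int) :
    ((lst.zip (lst.drop 1)).all (fun p => p.1 ≤ p.2)) = true ↔
      (∀ i : Nat, i + 1 < lst.length → lst.getD i 0 ≤ lst.getD (i + 1) 0) := by
  induction lst with
  | nil => simp
  | cons a t ih =>
    cases t with
    | nil => simp
    | cons b u =>
      simp only [List.drop_one, List.tail_cons, List.zip_cons_cons, List.all_cons,
        Bool.and_eq_true, decide_eq_true_eq]
      have ih' := ih
      simp only [List.drop_one, List.tail_cons] at ih'
      rw [ih']
      constructor
      · rintro ⟨hab, h⟩ i hi
        cases i with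
        | zero => simpa using hab
        | succ i =>
          have := h i (by simpa [List.length_cons] using hi)
          simpa using this
      · intro h
        refine ⟨by simpa using h 0 (by simp), fun i hi => ?_⟩
        have := h (i + 1) (by simp [List.length_cons] at hi ⊢; omega)
        simpa using this

-- adjacent comparisons imply all forward comparisons, by induction on the gap
theorem adj_to_le (lst : List Int)
    (hadj : ∀ i : Nat, i + 1 < lst.length → lst.getD i 0 ≤ lst.getD (i + 1) 0) :
    ∀ j i : Nat, j ≤ i → i < lst.length → lst.getD j 0 ≤ lst.getD i 0 := by
  have key : ∀ d j : Nat, j + d < lst.length → lst.getD j 0 ≤ lst.getD (j + d) 0 := by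
    intro d
    induction d with
    | zero => intro j _; simp
    | succ d ihd =>
      intro j hjd
      have step : lst.getD (j + d) 0 ≤ lst.getD (j + d + 1) 0 := hadj (j + d) (by omega)
      exact le_trans (ihd j (by omega)) step
  intro j i h2 h3
  have := key (i - j) j (by omega)
  have e : j + (i - j) = i := by omega
  rwa [e] at this

-- adjacent comparisons over the tail hold iff all tail comparisons hold
theorem tailAdj_iff (lst : List Int) :
    (((lst.drop 1).zip (lst.drop 2)).all (fun p => p.1 ≤ p.2)) = true ↔
      (∀ j i : Nat, 1 ≤ j → j ≤ i → i < lst.length → lst.getD j 0 ≤ lst.getD i 0) := by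
  have hdrop : lst.drop 2 = (lst.drop 1).drop 1 := by rw [List.drop_drop]
  rw [hdrop, zipAdj_iff (lst.drop 1)]
  constructor
  · intro h j i h1 h2 h3
    have hadj : ∀ k : Nat, k + 1 < (lst.drop 1).length →
        (lst.drop 1).getD k 0 ≤ (lst.drop 1).getD (k + 1) 0 := h
    have := adj_to_le (lst.drop 1) hadj (j - 1) (i - 1) (by omega)
      (by rw [List.length_drop]; omega)
    rw [getD_drop', getD_drop'] at this
    have e1 : 1 + (j - 1) = j := by omega
    have e2 : 1 + (i - 1) = i := by omega
    rwa [e1, e2] at this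
  · intro h i hi
    rw [List.length_drop] at hi
    rw [getD_drop', getD_drop']
    exact h (1 + i) (1 + (i + 1)) (by omega) (by omega) (by omega) |>.trans_eq
      (by norm_num)

theorem all_ge_iff (lst : List Int) :
    (lst.all (fun x => decide (2 ≤ x))) = true ↔ (∀ i : Nat, i < lst.length → 2 ≤ lst.getD i 0) := by
  simp only [List.all_eq_true, decide_eq_true_eq]
  constructor
  · intro h i hi
    have : lst.getD i 0 = lst[i]'hi := List.getD_eq_getElem lst 0 hi
    rw [this]; exact h _ (List.getElem_mem hi)
  · intro h x hx
    obtain ⟨i, hi, rfl⟩ := List.getElem_of_mem hx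
    have := h i hi
    rwa [List.getD_eq_getElem lst 0 hi] at this

theorem mem_ge_iff (lst : List Int) :
    (∀ x ∈ lst, (2:Int) ≤ x) ↔ (∀ i : Nat, i < lst.length → 2 ≤ lst.getD i 0) := by
  rw [← all_ge_iff]
  simp [List.all_eq_true]

-- ===== VERDICT (by name: the statement is the Claim_ definition above) =====
theorem estegyptienne_spec : Claim_unchanged_estegyptienne := by
  intro lst _ hnd
  unfold estegyptienne_alt
  cases hA : estegyptienne lst with
  | true =>
    obtain ⟨hge, htail⟩ := (estA_iff lst).mp hA
    have hall : (lst.all (fun x => decide (2 ≤ x))) = true := (all_ge_iff lst).mpr hge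
    have htailAdj : (((lst.drop 1).zip (lst.drop 2)).all (fun p => p.1 ≤ p.2)) = true :=
      (tailAdj_iff lst).mpr htail
    -- ¬D_ leaves two cases: short list, or lst[0] ≤ lst[1]
    have hcase : lst.length < 2 ∨ lst.getD 0 0 ≤ lst.getD 1 0 := by
      by_contra hc
      push Not at hc
      exact hnd ⟨hc.1, hc.2, (mem_ge_iff lst).mpr hge, htailAdj⟩
    have hzip : ((lst.zip (lst.drop 1)).all (fun p => p.1 ≤ p.2)) = true := by
      rw [zipAdj_iff]
      intro i hi
      cases i with
      | zero =>
        rcases hcase with h | h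
        · omega
        · simpa using h
      | succ i => exact htail (i + 1) (i + 2) (by omega) (by omega) hi
    simp only [hall, hzip, Bool.and_self]
  | false =>
    symm
    rw [Bool.eq_false_iff]
    intro hB
    rw [Bool.and_eq_true] at hB
    have hadj := (zipAdj_iff lst).mp hB.2
    have hAtrue : estegyptienne lst = true := by
      rw [estA_iff]
      refine ⟨(all_ge_iff lst).mp hB.1, fun j i h1 h2 h3 => ?_⟩
      exact adj_to_le lst hadj j i h2 h3
    rw [hAtrue] at hA; cases hA

theorem estegyptienne_changed : Claim_changed_estegyptienne := by
  unfold Claim_changed_estegyptienne; decide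

theorem estegyptienne_tight : Claim_exact_estegyptienne := by
  intro lst _ hd
  obtain ⟨hlen, hlt, hge, htail⟩ := hd
  have hA : estegyptienne lst = true := by
    rw [estA_iff]
    exact ⟨(mem_ge_iff lst).mp hge, (tailAdj_iff lst).mp htail⟩
  have hB : estegyptienne_alt lst = false := by
    unfold estegyptienne_alt
    have hz : ((lst.zip (lst.drop 1)).all (fun p => p.1 ≤ p.2)) = false := by
      rw [Bool.eq_false_iff]
      intro hz
      have e : (0:Nat) + 1 = 1 := rfl
      have := (zipAdj_iff lst).mp hz 0 (by omega)
      rw [e] at this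
      omega
    rw [hz, Bool.and_false]
  rw [hA, hB]; decide
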